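-- pv_equiv track=rewrite | github.com/HoutanGh/my-trading-platform | apps/core/analytics/flow/take_profit.py | _pick_reason
-- ===== SOURCE A (Python) =====
-- from enum import Enum
-- from typing import Iterable, Sequence
--
-- class TakeProfitReason(str, Enum):
--     SWING = "swing"
--     PRIOR = "prior"
--     VOLUME = "volume"
--     VOLATILITY = "volatility"
--
-- def _pick_reason(reasons: Iterable[TakeProfitReason]) -> TakeProfitReason:
--     priority = {
--         TakeProfitReason.SWING: 1,
--         TakeProfitReason.PRIOR: 2,
--         TakeProfitReason.VOLUME: 3,
--         TakeProfitReason.VOLATILITY: 4,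
--     }
--     selected = None
--     selected_priority = 999
--     for reason in reasons:
--         rank = priority.get(reason, 999)
--         if rank < selected_priority:
--             selected = reason
--             selected_priority = rank
--     return selected or TakeProfitReason.VOLUME
-- ===== SOURCE B (Python) =====
-- from enum import Enum
-- from typing import Iterable
--
-- class TakeProfitReason(str, Enum):
--     SWING = "swing"
--     PRIOR = "prior"
--     VOLUME = "volume"
--     VOLATILITY = "volatility"
--
-- _PRIORITY_ORDER = (
--     TakeProfitReason.SWING,
--     TakeProfitReason.PRIOR,
--     TakeProfitReason.VOLUME,
--     TakeProfitReason.VOLATILITY,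
-- )
--
-- def _pick_reason(reasons: Iterable[TakeProfitReason]) -> TakeProfitReason:
--     present = set(reasons)
--     for member in _PRIORITY_ORDER:
--         if member in present:
--             return member
--     return TakeProfitReason.VOLUME
-- ===== Notes on version B (the rewrite author's own statement) =====
-- stated objective: idiomatic
-- what changed: Instead of scanning the input while maintaining a running minimum rank against a priority dict, B consumes the input once into a set and walks the fixed priority ladder, returning the first member present (VOLUME if none).
import Mathlib
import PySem

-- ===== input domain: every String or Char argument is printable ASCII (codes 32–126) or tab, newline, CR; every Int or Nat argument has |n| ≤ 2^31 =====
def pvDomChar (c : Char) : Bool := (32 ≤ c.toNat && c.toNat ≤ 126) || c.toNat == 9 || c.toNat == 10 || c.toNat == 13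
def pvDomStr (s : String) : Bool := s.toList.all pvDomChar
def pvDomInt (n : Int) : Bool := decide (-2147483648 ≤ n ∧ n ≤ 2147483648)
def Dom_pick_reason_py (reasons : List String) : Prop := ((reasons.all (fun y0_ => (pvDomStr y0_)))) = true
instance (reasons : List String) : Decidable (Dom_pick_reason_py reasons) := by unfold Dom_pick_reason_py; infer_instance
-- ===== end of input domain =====

-- B replaces A's running-minimum scan with one membership set and a walk down the fixed
-- priority ladder (idiomatic; same O(n) cost).

-- ===== PORT A =====
-- `priority.get(reason, 999)` — the priority dict as a first-match lookup
def pickReasonRank (s : String) : Int :=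
  if s = "swing" then 1
  else if s = "prior" then 2
  else if s = "volume" then 3
  else if s = "volatility" then 4
  else 999

-- one iteration of A's loop body
def pickStep (st : Option String × Int) (reason : String) : Option String × Int :=
  let rank := pickReasonRank reason
  if rank < st.2 then (some reason, rank) else st

def pick_reason_py (reasons : List String) : String :=
  let st := reasons.foldl pickStep (none, 999)
  -- `return selected or TakeProfitReason.VOLUME` (falsy selected → VOLUME)
  match st.1 with
  | none => "volume"
  | some s => if s = "" then "volume" else s

-- ===== PORT B =====
def pick_reason_py_alt (reasons : List String) : String :=
  let present : PySem.Set String := PySem.Set.ofList reasons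
  if present.contains "swing" then "swing"
  else if present.contains "prior" then "prior"
  else if present.contains "volume" then "volume"
  else if present.contains "volatility" then "volatility"
  else "volume"

-- ===== PRECONDITION & SPEC =====
def Spec_pick_reason_py (reasons : List String) (out : String) : Prop := out = pick_reason_py_alt reasons
instance (reasons : List String) (out : String) : Decidable (Spec_pick_reason_py reasons out) := by unfold Spec_pick_reason_py; infer_instance

-- ===== CLAIM (what is proved, stated in full; the proofs are below) =====
def Claim_equal_pick_reason_py : Prop := ∀ (reasons : List String), Dom_pick_reason_py reasons → Spec_pick_reason_py reasons (pick_reason_py reasons)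

-- ===== LEMMAS AND PROOFS =====

-- Characterisation of A's fold: from any accumulator with bound at most 999, the result
-- is determined by the current rank bound and which known reasons occur in the rest.
theorem pickReason_foldl_char (l : List String) (sel : Option String) (p : Int) (hp : p ≤ 999) :
    l.foldl pickStep (sel, p)
    = if 1 < p ∧ "swing" ∈ l then (some "swing", 1)
      else if 2 < p ∧ "prior" ∈ l then (some "prior", 2)
      else if 3 < p ∧ "volume" ∈ l then (some "volume", 3)
      else if 4 < p ∧ "volatility" ∈ l then (some "volatility", 4)
      else (sel, p) := by
  induction l generalizing sel p with
  | nil => simp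
  | cons r l ih =>
    rw [List.foldl_cons]
    by_cases h1 : r = "swing"
    · subst h1
      by_cases hlt : (1:Int) < p
      · rw [show pickStep (sel, p) "swing" = (some "swing", 1) from by
            simp [pickStep, pickReasonRank, hlt], ih _ _ (by omega)]
        simp [hlt]
      · rw [show pickStep (sel, p) "swing" = (sel, p) from by
            simp [pickStep, pickReasonRank]; omega, ih _ _ hp]
        have e2 : ¬ ((2:Int) < p) := by omega
        have e3 : ¬ ((3:Int) < p) := by omega
        have e4 : ¬ ((4:Int) < p) := by omega
        simp [hlt, e2, e3, e4]
    · by_cases h2 : r = "prior"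
      · subst h2
        by_cases hlt : (2:Int) < p
        · rw [show pickStep (sel, p) "prior" = (some "prior", 2) from by
              simp [pickStep, pickReasonRank, hlt], ih _ _ (by omega)]
          have e1 : (1:Int) < p := by omega
          by_cases m1 : "swing" ∈ l <;> simp [hlt, e1, m1]
        · rw [show pickStep (sel, p) "prior" = (sel, p) from by
              simp [pickStep, pickReasonRank]; omega, ih _ _ hp]
          have e3 : ¬ ((3:Int) < p) := by omega
          have e4 : ¬ ((4:Int) < p) := by omega
          by_cases m1 : "swing" ∈ l <;> by_cases e1 : (1:Int) < p <;>
            simp [hlt, e1, e3, e4, m1]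
      · by_cases h3 : r = "volume"
        · subst h3
          by_cases hlt : (3:Int) < p
          · rw [show pickStep (sel, p) "volume" = (some "volume", 3) from by
                simp [pickStep, pickReasonRank, hlt], ih _ _ (by omega)]
            have e1 : (1:Int) < p := by omega
            have e2 : (2:Int) < p := by omega
            by_cases m1 : "swing" ∈ l <;> by_cases m2 : "prior" ∈ l <;>
              simp [hlt, e1, e2, m1, m2]
          · rw [show pickStep (sel, p) "volume" = (sel, p) from by
                simp [pickStep, pickReasonRank]; omega, ih _ _ hp]
            have e4 : ¬ ((4:Int) < p) := by omega
            by_cases m1 : "swing" ∈ l <;> by_cases m2 : "prior" ∈ l <;>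
              by_cases e1 : (1:Int) < p <;> by_cases e2 : (2:Int) < p <;>
                simp [hlt, e1, e2, e4, m1, m2]
        · by_cases h4 : r = "volatility"
          · subst h4
            by_cases hlt : (4:Int) < p
            · rw [show pickStep (sel, p) "volatility" = (some "volatility", 4) from by
                  simp [pickStep, pickReasonRank, hlt], ih _ _ (by omega)]
              have e1 : (1:Int) < p := by omega
              have e2 : (2:Int) < p := by omega
              have e3 : (3:Int) < p := by omega
              by_cases m1 : "swing" ∈ l <;> by_cases m2 : "prior" ∈ l <;>
                by_cases m3 : "volume" ∈ l <;> simp [hlt, e1, e2, e3, m1, m2, m3]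
            · rw [show pickStep (sel, p) "volatility" = (sel, p) from by
                  simp [pickStep, pickReasonRank]; omega, ih _ _ hp]
              by_cases m1 : "swing" ∈ l <;> by_cases m2 : "prior" ∈ l <;>
                by_cases m3 : "volume" ∈ l <;> by_cases e1 : (1:Int) < p <;>
                  by_cases e2 : (2:Int) < p <;> by_cases e3 : (3:Int) < p <;>
                    simp [hlt, e1, e2, e3, m1, m2, m3]
          · rw [show pickStep (sel, p) r = (sel, p) from by
                have hr : pickReasonRank r = 999 := by
                  simp [pickReasonRank, h1, h2, h3, h4]
                simp [pickStep, hr]; omega, ih _ _ hp]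
            have m1 : ("swing" ∈ r :: l ↔ "swing" ∈ l) := by simp [Ne.symm h1]
            have m2 : ("prior" ∈ r :: l ↔ "prior" ∈ l) := by simp [Ne.symm h2]
            have m3 : ("volume" ∈ r :: l ↔ "volume" ∈ l) := by simp [Ne.symm h3]
            have m4 : ("volatility" ∈ r :: l ↔ "volatility" ∈ l) := by simp [Ne.symm h4]
            simp only [m1, m2, m3, m4]

-- ===== VERDICT (by name: the statement is the Claim_ definition above) =====
theorem pick_reason_py_spec : Claim_equal_pick_reason_py := by
  intro reasons _
  unfold Spec_pick_reason_py pick_reason_py pick_reason_py_alt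
  rw [pickReason_foldl_char _ _ _ (by omega)]
  have hsw : PySem.Set.contains (PySem.Set.ofList reasons) "swing" = ("swing" ∈ reasons : Bool) := by
    simp [pysem]
  have hpr : PySem.Set.contains (PySem.Set.ofList reasons) "prior" = ("prior" ∈ reasons : Bool) := by
    simp [pysem]
  have hvo : PySem.Set.contains (PySem.Set.ofList reasons) "volume" = ("volume" ∈ reasons : Bool) := by
    simp [pysem]
  have hvl : PySem.Set.contains (PySem.Set.ofList reasons) "volatility" = ("volatility" ∈ reasons : Bool) := by
    simp [pysem]
  simp only [hsw, hpr, hvo, hvl]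
  by_cases h1 : "swing" ∈ reasons <;>
    by_cases h2 : "prior" ∈ reasons <;>
      by_cases h3 : "volume" ∈ reasons <;>
        by_cases h4 : "volatility" ∈ reasons <;>
          simp [h1, h2, h3, h4]
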